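-- pv_equiv track=rewrite | github.com/Shredder42/tarot_card_riddle | riddle.py | determine_if_factors_remaining
-- ===== SOURCE A (Python) =====
-- def find_factors(card):
--     # finds the factors of a card
--     factors_list = []
--     for i in range(1, card):
--         if card % i == 0:
--             factors_list.append(i)
--     return factors_list
--
-- def determine_if_factors_remaining(playable_cards):
--     factors = False
--     for card in playable_cards:
--         temp_factors = find_factors(card)
--         for factor in temp_factors:
--             if factor in playable_cards:
--                 factors = True
--                 break
--     return factors
-- ===== SOURCE B (Python) =====
-- def determine_if_factors_remaining(playable_cards):
--     cards = set(playable_cards)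
--     for card in playable_cards:
--         if card >= 2:
--             if 1 in cards:
--                 return True
--             d = 2
--             while d * d <= card:
--                 if card % d == 0 and (d in cards or card // d in cards):
--                     return True
--                 d += 1
--     return False
-- ===== Notes on version B (the rewrite author's own statement) =====
-- stated objective: faster
-- what changed: B builds a set of the cards once and, per card, trial-divides only up to sqrt(card) checking both cofactors, returning on the first hit, instead of enumerating all proper factors of every card and scanning the list for each.
import Mathlib
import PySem

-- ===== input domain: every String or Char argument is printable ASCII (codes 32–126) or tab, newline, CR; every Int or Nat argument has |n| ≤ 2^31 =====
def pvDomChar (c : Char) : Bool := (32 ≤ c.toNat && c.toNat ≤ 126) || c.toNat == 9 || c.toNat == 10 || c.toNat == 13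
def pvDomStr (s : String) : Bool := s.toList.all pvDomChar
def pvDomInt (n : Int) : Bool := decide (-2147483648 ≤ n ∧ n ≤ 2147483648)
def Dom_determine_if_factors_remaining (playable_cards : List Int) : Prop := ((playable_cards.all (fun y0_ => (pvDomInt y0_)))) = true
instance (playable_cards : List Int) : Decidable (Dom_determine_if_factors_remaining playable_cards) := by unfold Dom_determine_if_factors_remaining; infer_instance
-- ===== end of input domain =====

-- B replaces A's full proper-factor enumeration (and list scans) by one set of the cards
-- plus trial division up to sqrt(card) with an early return: asymptotically faster, same value.

-- ===== PORT A =====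
def find_factors (card : Int) : List Int :=
  (PySem.List.pyRange 1 card 1).foldl
    (fun factors_list i => if PySem.Int.mod card i == 0 then factors_list ++ [i] else factors_list) []

-- the inner 'for factor in temp_factors: if factor in playable_cards: factors = True; break'
def pvInner (playable_cards : List Int) (factors : Bool) : List Int → Bool
  | [] => factors
  | f :: rest => if playable_cards.contains f then true else pvInner playable_cards factors rest

def determine_if_factors_remaining (playable_cards : List Int) : Bool :=
  playable_cards.foldl (fun factors card => pvInner playable_cards factors (find_factors card)) false

-- ===== PORT B =====
-- the 'while d * d <= card' trial-division loop; terminates since d*d ≤ card bounds d by card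
def pvTrial (cards : PySem.Set Int) (card : Int) (d : Int) : Bool :=
  if h : d * d ≤ card then
    if PySem.Int.mod card d == 0 &&
        (PySem.Set.contains cards d || PySem.Set.contains cards (PySem.Int.floordiv card d)) then
      true
    else pvTrial cards card (d + 1)
  else false
termination_by (card + 1 - d).toNat
decreasing_by
  have hd : d ≤ card := by
    by_cases h0 : d ≤ 0
    · nlinarith
    · nlinarith
  omega

def pvBGo (cards : PySem.Set Int) : List Int → Bool
  | [] => false
  | card :: rest =>
    if 2 ≤ card then
      if PySem.Set.contains cards 1 then true
      else if pvTrial cards card 2 then true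
      else pvBGo cards rest
    else pvBGo cards rest

def determine_if_factors_remaining_alt (playable_cards : List Int) : Bool :=
  pvBGo (PySem.Set.ofList playable_cards) playable_cards

-- ===== PRECONDITION & SPEC =====
def Spec_determine_if_factors_remaining (playable_cards : List Int) (out : Bool) : Prop := out = determine_if_factors_remaining_alt playable_cards
instance (playable_cards : List Int) (out : Bool) : Decidable (Spec_determine_if_factors_remaining playable_cards out) := by unfold Spec_determine_if_factors_remaining; infer_instance

-- ===== CLAIM (what is proved, stated in full; the proofs are below) =====
def Claim_equal_determine_if_factors_remaining : Prop := ∀ (playable_cards : List Int), Dom_determine_if_factors_remaining playable_cards → Spec_determine_if_factors_remaining playable_cards (determine_if_factors_remaining playable_cards)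

-- ===== LEMMAS AND PROOFS =====

-- the common meaning: some card in the list has a proper factor that is also in the list
def pvHasFactor (l : List Int) : Prop :=
  ∃ c ∈ l, ∃ f : Int, 1 ≤ f ∧ f < c ∧ f ∣ c ∧ f ∈ l

lemma find_factors_mem (card f : Int) :
    f ∈ find_factors card ↔ 1 ≤ f ∧ f < card ∧ f ∣ card := by
  unfold find_factors
  rw [PySem.List.foldl_append_if_eq_filter]
  simp [List.mem_filter, PySem.List.mem_pyRange_one, PySem.Int.mod_eq_zero_iff_dvd]
  tauto

lemma pvInner_eq (l : List Int) (b : Bool) (fs : List Int) :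
    pvInner l b fs = (b || fs.any l.contains) := by
  induction fs generalizing b with
  | nil => simp [pvInner]
  | cons f rest ih =>
    cases b <;> by_cases h : f ∈ l <;> simp [pvInner, h, ih]

lemma pvA_foldl (l m : List Int) (b : Bool) :
    m.foldl (fun factors card => pvInner l factors (find_factors card)) b
      = (b || m.any (fun c => (find_factors c).any l.contains)) := by
  induction m generalizing b with
  | nil => simp
  | cons c rest ih =>
    simp only [List.foldl_cons, List.any_cons]
    rw [pvInner_eq, ih, Bool.or_assoc]

lemma pvA_iff (l : List Int) :
    determine_if_factors_remaining l = true ↔ pvHasFactor l := by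
  unfold determine_if_factors_remaining pvHasFactor
  rw [pvA_foldl]
  simp [List.any_eq_true, find_factors_mem]
  constructor
  · rintro ⟨c, hc, f, ⟨h1, h2, h3⟩, hf⟩; exact ⟨c, hc, f, h1, h2, h3, hf⟩
  · rintro ⟨c, hc, f, h1, h2, h3, hf⟩; exact ⟨c, hc, f, ⟨h1, h2, h3⟩, hf⟩

lemma pvTrial_iff (cards : PySem.Set Int) (card d : Int) :
    2 ≤ d →
      (pvTrial cards card d = true ↔
        ∃ e : Int, d ≤ e ∧ e * e ≤ card ∧ e ∣ card ∧
          (e ∈ cards ∨ PySem.Int.floordiv card e ∈ cards)) := by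
  induction d using pvTrial.induct (cards := cards) (card := card) with
  | case1 d h hhit =>
    intro _
    rw [pvTrial, dif_pos h, if_pos hhit]
    simp only [Bool.and_eq_true, Bool.or_eq_true, beq_iff_eq, PySem.Set.contains_iff,
      PySem.Int.mod_eq_zero_iff_dvd] at hhit
    exact iff_of_true rfl ⟨d, le_refl d, h, hhit.1, hhit.2⟩
  | case2 d h hmiss ih =>
    intro hd
    rw [pvTrial, dif_pos h, if_neg hmiss, ih (by omega)]
    constructor
    · rintro ⟨e, he, rest⟩; exact ⟨e, by omega, rest⟩
    · rintro ⟨e, he, h2, h3, h4⟩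
      refine ⟨e, ?_, h2, h3, h4⟩
      rcases eq_or_lt_of_le he with rfl | hlt
      · exfalso
        simp only [Bool.and_eq_true, Bool.or_eq_true, beq_iff_eq, PySem.Set.contains_iff,
          PySem.Int.mod_eq_zero_iff_dvd, not_and_or, not_or] at hmiss
        tauto
      · omega
  | case3 d h =>
    intro hd
    rw [pvTrial, dif_neg h]
    refine iff_of_false (by simp) ?_
    rintro ⟨e, he, h2, _, _⟩
    exact h (by nlinarith [mul_nonneg (sub_nonneg.mpr he) (by omega : (0:Int) ≤ e + d)])

lemma pvBGo_iff (cards : PySem.Set Int) (m : List Int) :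
    pvBGo cards m = true ↔
      ∃ c ∈ m, 2 ≤ c ∧ (((1 : Int) ∈ cards) ∨ pvTrial cards c 2 = true) := by
  induction m with
  | nil => simp [pvBGo]
  | cons c rest ih =>
    simp only [pvBGo]
    split_ifs with hc h1 ht
    · exact iff_of_true rfl
        ⟨c, by simp, hc, Or.inl ((PySem.Set.contains_iff _ _).mp h1)⟩
    · exact iff_of_true rfl ⟨c, by simp, hc, Or.inr ht⟩
    · rw [ih]
      constructor
      · rintro ⟨c', hc', rest'⟩; exact ⟨c', by simp [hc'], rest'⟩
      · rintro ⟨c', hc', h2, h3⟩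
        rcases List.mem_cons.mp hc' with rfl | hmem
        · rcases h3 with h3 | h3
          · exact absurd ((PySem.Set.contains_iff _ _).mpr h3) h1
          · exact absurd h3 ht
        · exact ⟨c', hmem, h2, h3⟩
    · rw [ih]
      constructor
      · rintro ⟨c', hc', rest'⟩; exact ⟨c', by simp [hc'], rest'⟩
      · rintro ⟨c', hc', h2, h3⟩
        rcases List.mem_cons.mp hc' with rfl | hmem
        · omega
        · exact ⟨c', hmem, h2, h3⟩

-- the square-root trick: a proper factor exists iff 1 is a card or some divisor d ≤ √card hits
lemma pvSqrt_trick (l : List Int) (c : Int) (hc : 2 ≤ c) :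
    (∃ f : Int, 1 ≤ f ∧ f < c ∧ f ∣ c ∧ f ∈ l) ↔
      ((1 : Int) ∈ l ∨
        ∃ e : Int, 2 ≤ e ∧ e * e ≤ c ∧ e ∣ c ∧
          (e ∈ l ∨ PySem.Int.floordiv c e ∈ l)) := by
  constructor
  · rintro ⟨f, h1, h2, h3, h4⟩
    rcases eq_or_lt_of_le h1 with rfl | hf2
    · exact Or.inl h4
    · right
      obtain ⟨g, hg⟩ := h3
      have hf0 : 0 < f := by omega
      have hg2 : 2 ≤ g := by nlinarith
      have hdivfg : PySem.Int.floordiv c g = f := by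
        rw [PySem.Int.floordiv_eq_iff_of_pos (by omega)]
        constructor <;> nlinarith
      rcases le_total f g with hle | hle
      · exact ⟨f, by omega, by nlinarith, ⟨g, hg⟩, Or.inl h4⟩
      · refine ⟨g, hg2, by nlinarith, ⟨f, by rw [hg, mul_comm]⟩, Or.inr ?_⟩
        rw [hdivfg]; exact h4
  · rintro (h1 | ⟨e, h2, h3, h4, h5 | h5⟩)
    · exact ⟨1, le_refl 1, by omega, one_dvd c, h1⟩
    · exact ⟨e, by omega, by nlinarith, h4, h5⟩
    · obtain ⟨g, hg⟩ := h4
      have hge : e ≤ g := by nlinarith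
      have hdiv : PySem.Int.floordiv c e = g := by
        rw [PySem.Int.floordiv_eq_iff_of_pos (by omega)]
        constructor <;> nlinarith
      exact ⟨g, by omega, by nlinarith, ⟨e, by rw [hg, mul_comm]⟩, by rwa [hdiv] at h5⟩

lemma pvB_iff (l : List Int) :
    determine_if_factors_remaining_alt l = true ↔ pvHasFactor l := by
  unfold determine_if_factors_remaining_alt pvHasFactor
  rw [pvBGo_iff]
  constructor
  · rintro ⟨c, hc, h2, h3⟩
    refine ⟨c, hc, ?_⟩
    rw [pvSqrt_trick l c h2]
    rcases h3 with h3 | h3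
    · exact Or.inl ((PySem.Set.mem_ofList _ _).mp h3)
    · rw [pvTrial_iff (PySem.Set.ofList l) c 2 (by norm_num)] at h3
      obtain ⟨e, he1, he2, he3, he4⟩ := h3
      right
      exact ⟨e, he1, he2, he3, by simpa [PySem.Set.mem_ofList] using he4⟩
  · rintro ⟨c, hc, f, h1, h2, h3, h4⟩
    have hc2 : 2 ≤ c := by omega
    refine ⟨c, hc, hc2, ?_⟩
    have := (pvSqrt_trick l c hc2).mp ⟨f, h1, h2, h3, h4⟩
    rcases this with h | ⟨e, he1, he2, he3, he4⟩
    · exact Or.inl ((PySem.Set.mem_ofList _ _).mpr h)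
    · right
      rw [pvTrial_iff (PySem.Set.ofList l) c 2 (by norm_num)]
      exact ⟨e, he1, he2, he3, by simpa [PySem.Set.mem_ofList] using he4⟩

-- ===== VERDICT (by name: the statement is the Claim_ definition above) =====
theorem determine_if_factors_remaining_spec : Claim_equal_determine_if_factors_remaining := by
  intro l _
  unfold Spec_determine_if_factors_remaining
  have ha := pvA_iff l
  have hb := pvB_iff l
  cases hA : determine_if_factors_remaining l <;> cases hB : determine_if_factors_remaining_alt l <;>
    simp_all
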